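-- pv_equiv track=rewrite | github.com/Foosa7/MZIC | app/utils/mzi_lut.py | map_angles_general
-- ===== SOURCE A (Python) =====
-- def label_odd(i, j):
--     """
--     Given an odd diagonal i (i = 1,3,5,…) and an index j (0 ≤ j < i),
--     return the physical label (e.g. "A1", "A2", "B1", "C1", "A3", "B2", "C2", "D1", "E2")
--     according to the desired ordering.
--
--     For N = 8, for example:
--       - i = 1, j = 0  → "A1"
--       - i = 3, then j = 0 → "A2", j = 1 → "B1", j = 2 → "C1"
--       - i = 5, then j = 0 → "A3", j = 1 → "B2", j = 2 → "C2", j = 3 → "D1", j = 4 → "E2"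
--     """
--     # Mapping for N = 8
--     if i == 1:
--         return "A1"
--     elif i == 3:
--         mapping = {0: "A2", 1: "B1", 2: "C1"}
--         return mapping[j]
--     elif i == 5:
--         mapping = {0: "A3", 1: "B2", 2: "C2", 3: "D1", 4: "E1"}
--         return mapping[j]
--     elif i == 7:
--         mapping = {0: "A4", 1: "B3", 2: "C3", 3: "D2", 4: "E2", 5: "F1", 6: "G1"}
--         return mapping[j]
--     else:
--         # Placeholder (extend later)
--         return f"X{i}{j}"
--
-- def label_even(i, j):
--     """
--     Given an even diagonal i (i = 2,4,6,…) and an index j (1 ≤ j ≤ i),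
--     return the physical label (e.g. "H3", "G4", "H2", "G3", "F3", "E4", "H1", "G2", "F2", "E3", "D2", "C3")
--     according to the desired ordering.
--
--     E.g. for N = 8:
--       - i = 2, j = 1 → "H3", j = 2 → "G4"
--       - i = 4, then j = 1 → "H2", j = 2 → "G3", j = 3 → "F3", j = 4 → "E4"
--       - i = 6, then j = 1 → "H1", j = 2 → "G2", j = 3 → "F2", j = 4 → "E3", j = 5 → "D2", j = 6 → "C3"
--     """
--     if i == 2:
--         mapping = {1: "H3", 2: "G4"}
--         return mapping[j]
--     elif i == 4:
--         mapping = {1: "H2", 2: "G3", 3: "F3", 4: "E4"}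
--         return mapping[j]
--     elif i == 6:
--         mapping = {1: "H1", 2: "G2", 3: "F2", 4: "E3", 5: "D3", 6: "C4"}
--         return mapping[j]
--     else:
--         return f"Y{i}{j}"  # Placeholder (extend later)
--
-- def map_angles_general(N, left_angles, right_angles):
--     """
--     General mapping for an N-mode interferometer.
--     Uses the same loop order as in clemens.py:
--       For i = 1,...,N-1:
--          if i odd: loop j = 0,...,i-1, assign from right_angles (after reversing that list)
--          if i even: loop j = 1,...,i, assign from left_angles.
--     The physical label for each operation is obtained from label_odd or label_even.
--
--     Returns:
--         dict: { label: (θ, φ) } in the order defined by the decomposition.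
--     """
--     mapping = {}
--     # Copy angle lists so we don't alter originals.
--     r_list = right_angles[:]
--     l_list = left_angles[:]
--     # Reverse the right_angles so the first operation gets the last element.
--     r_list.reverse()
--
--     # Loop over diagonals.
--     for i in range(1, N):
--         if i % 2 == 1:
--             # Odd diagonal → use r_list (T⁻¹)
--             for j in range(i):
--                 if r_list:
--                     label = label_odd(i, j)
--                     mapping[label] = r_list.pop(0)
--         else:
--             # Even diagonal → use l_list (T)
--             for j in range(1, i+1):
--                 if l_list:
--                     label = label_even(i, j)
--                     mapping[label] = l_list.pop(0)
--     return mapping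
-- ===== SOURCE B (Python) =====
-- def label_odd(i, j):
--     if i == 1:
--         return "A1"
--     elif i == 3:
--         mapping = {0: "A2", 1: "B1", 2: "C1"}
--         return mapping[j]
--     elif i == 5:
--         mapping = {0: "A3", 1: "B2", 2: "C2", 3: "D1", 4: "E1"}
--         return mapping[j]
--     elif i == 7:
--         mapping = {0: "A4", 1: "B3", 2: "C3", 3: "D2", 4: "E2", 5: "F1", 6: "G1"}
--         return mapping[j]
--     else:
--         return f"X{i}{j}"
--
-- def label_even(i, j):
--     if i == 2:
--         mapping = {1: "H3", 2: "G4"}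
--         return mapping[j]
--     elif i == 4:
--         mapping = {1: "H2", 2: "G3", 3: "F3", 4: "E4"}
--         return mapping[j]
--     elif i == 6:
--         mapping = {1: "H1", 2: "G2", 3: "F2", 4: "E3", 5: "D3", 6: "C4"}
--         return mapping[j]
--     else:
--         return f"Y{i}{j}"
--
-- def map_angles_general(N, left_angles, right_angles):
--     # Pair each diagonal's precomputed label block with the remaining angle
--     # stream via zip, computing only as many labels as angles remain, then
--     # advance the stream by slicing; no per-element emptiness guard, no pop(0).
--     rr = right_angles[::-1]
--     ll = left_angles[:]
--     mapping = {}
--     for i in range(1, N):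
--         if i % 2:
--             t = min(i, len(rr))
--             mapping.update(zip([label_odd(i, j) for j in range(t)], rr))
--             rr = rr[i:]
--         else:
--             t = min(i, len(ll))
--             mapping.update(zip([label_even(i, j) for j in range(1, t + 1)], ll))
--             ll = ll[i:]
--     return mapping
-- ===== Notes on version B (the rewrite author's own statement) =====
-- stated objective: faster
-- what changed: A runs a per-element inner loop over every diagonal that guards on emptiness and pops each angle off mutable list copies (pop(0) is linear); B pairs a per-diagonal label block - computing only as many labels as angles remain - with the angle stream by one truncating zip and advances the stream by slicing, so exhausted streams cost nothing per diagonal.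
import Mathlib
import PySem

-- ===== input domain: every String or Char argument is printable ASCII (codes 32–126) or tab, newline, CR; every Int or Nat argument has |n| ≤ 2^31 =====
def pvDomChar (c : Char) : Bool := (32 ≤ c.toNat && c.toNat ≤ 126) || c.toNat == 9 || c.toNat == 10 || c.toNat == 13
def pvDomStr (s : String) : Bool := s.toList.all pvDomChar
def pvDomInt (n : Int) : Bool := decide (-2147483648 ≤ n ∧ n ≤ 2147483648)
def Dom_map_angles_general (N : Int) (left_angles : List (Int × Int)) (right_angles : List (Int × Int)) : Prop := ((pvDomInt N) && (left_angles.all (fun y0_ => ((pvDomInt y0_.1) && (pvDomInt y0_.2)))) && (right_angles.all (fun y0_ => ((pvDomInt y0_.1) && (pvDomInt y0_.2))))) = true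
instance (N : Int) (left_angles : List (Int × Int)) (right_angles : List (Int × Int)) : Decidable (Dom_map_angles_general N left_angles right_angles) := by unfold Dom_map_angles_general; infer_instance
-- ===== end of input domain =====

-- B replaces A's per-element emptiness-guarded pop(0) loop by per-diagonal label
-- blocks (only as many labels as angles remain) paired with the angle stream by zip
-- and consumed by slicing (alternative decomposition; neither version mutates its arguments).

-- ===== PORT A =====
-- helper label_odd; the `.getD ""` only totalizes Python's mapping[j] lookup
-- (the loops below never pass a j outside the mapping's keys).
def labelOdd (i j : Int) : String :=
  if i == 1 then "A1"
  else if i == 3 then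
    (((PySem.Dict.ofList [((0:Int),"A2"),(1,"B1"),(2,"C1")]).get? j).getD "")
  else if i == 5 then
    (((PySem.Dict.ofList [((0:Int),"A3"),(1,"B2"),(2,"C2"),(3,"D1"),(4,"E1")]).get? j).getD "")
  else if i == 7 then
    (((PySem.Dict.ofList [((0:Int),"A4"),(1,"B3"),(2,"C3"),(3,"D2"),(4,"E2"),(5,"F1"),(6,"G1")]).get? j).getD "")
  else "X" ++ PySem.Int.toStr i ++ PySem.Int.toStr j

-- helper label_even, same remark about `.getD ""`.
def labelEven (i j : Int) : String :=
  if i == 2 then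
    (((PySem.Dict.ofList [((1:Int),"H3"),(2,"G4")]).get? j).getD "")
  else if i == 4 then
    (((PySem.Dict.ofList [((1:Int),"H2"),(2,"G3"),(3,"F3"),(4,"E4")]).get? j).getD "")
  else if i == 6 then
    (((PySem.Dict.ofList [((1:Int),"H1"),(2,"G2"),(3,"F2"),(4,"E3"),(5,"D3"),(6,"C4")]).get? j).getD "")
  else "Y" ++ PySem.Int.toStr i ++ PySem.Int.toStr j

def map_angles_general (N : Int) (left_angles : List (Int × Int)) (right_angles : List (Int × Int)) : List (String × Int × Int) :=
  -- r_list = right_angles[:]; r_list.reverse(); l_list = left_angles[:]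
  let r0 := right_angles.reverse
  let st := (PySem.List.pyRange 1 N 1).foldl
    (fun (st : PySem.Dict String (Int × Int) × List (Int × Int) × List (Int × Int)) i =>
      if PySem.Int.mod i 2 == 1 then
        (PySem.List.pyRange 0 i 1).foldl
          (fun st j =>
            match st.2.1 with          -- `if r_list:` then `r_list.pop(0)`
            | [] => st
            | p :: rest => (st.1.insert (labelOdd i j) p, rest, st.2.2)) st
      else
        (PySem.List.pyRange 1 (i + 1) 1).foldl
          (fun st j =>
            match st.2.2 with          -- `if l_list:` then `l_list.pop(0)`
            | [] => st
            | p :: rest => (st.1.insert (labelEven i j) p, st.2.1, rest)) st)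
    (PySem.Dict.empty, r0, left_angles)
  st.1.items

-- ===== PORT B =====
def map_angles_general_alt (N : Int) (left_angles : List (Int × Int)) (right_angles : List (Int × Int)) : List (String × Int × Int) :=
  let st := (PySem.List.pyRange 1 N 1).foldl
    (fun (st : PySem.Dict String (Int × Int) × List (Int × Int) × List (Int × Int)) i =>
      if PySem.Int.mod i 2 != 0 then
        let t := min i (st.2.1.length : Int)
        ((((PySem.List.pyRange 0 t 1).map (fun j => labelOdd i j)).zip st.2.1).foldl
            (fun m p => m.insert p.1 p.2) st.1,
         PySem.List.slice st.2.1 (some i) none, st.2.2)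
      else
        let t := min i (st.2.2.length : Int)
        ((((PySem.List.pyRange 1 (t + 1) 1).map (fun j => labelEven i j)).zip st.2.2).foldl
            (fun m p => m.insert p.1 p.2) st.1,
         st.2.1, PySem.List.slice st.2.2 (some i) none))
    (PySem.Dict.empty, right_angles.reverse, left_angles)
  st.1.items

-- ===== PRECONDITION & SPEC =====
def Spec_map_angles_general (N : Int) (left_angles : List (Int × Int)) (right_angles : List (Int × Int)) (out : List (String × Int × Int)) : Prop := out = map_angles_general_alt N left_angles right_angles
instance (N : Int) (left_angles : List (Int × Int)) (right_angles : List (Int × Int)) (out : List (String × Int × Int)) : Decidable (Spec_map_angles_general N left_angles right_angles out) := by unfold Spec_map_angles_general; infer_instance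

-- ===== CLAIM (what is proved, stated in full; the proofs are below) =====
def Claim_equal_map_angles_general : Prop := ∀ (N : Int) (left_angles : List (Int × Int)) (right_angles : List (Int × Int)), Dom_map_angles_general N left_angles right_angles → Spec_map_angles_general N left_angles right_angles (map_angles_general N left_angles right_angles)

-- ===== LEMMAS AND PROOFS =====

-- proof-side names for the two loop bodies and the two label streams
def pvAState : Type := PySem.Dict String (Int × Int) × List (Int × Int) × List (Int × Int)
def pvStepA (st : pvAState) (i : Int) : pvAState :=
  if PySem.Int.mod i 2 == 1 then
    (PySem.List.pyRange 0 i 1).foldl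
      (fun st j =>
        match st.2.1 with
        | [] => st
        | p :: rest => (st.1.insert (labelOdd i j) p, rest, st.2.2)) st
  else
    (PySem.List.pyRange 1 (i + 1) 1).foldl
      (fun st j =>
        match st.2.2 with
        | [] => st
        | p :: rest => (st.1.insert (labelEven i j) p, st.2.1, rest)) st

def pvStepB (st : pvAState) (i : Int) : pvAState :=
  if PySem.Int.mod i 2 != 0 then
    let t := min i (st.2.1.length : Int)
    ((((PySem.List.pyRange 0 t 1).map (fun j => labelOdd i j)).zip st.2.1).foldl
        (fun m p => m.insert p.1 p.2) st.1,
     PySem.List.slice st.2.1 (some i) none, st.2.2)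
  else
    let t := min i (st.2.2.length : Int)
    ((((PySem.List.pyRange 1 (t + 1) 1).map (fun j => labelEven i j)).zip st.2.2).foldl
        (fun m p => m.insert p.1 p.2) st.1,
     st.2.1, PySem.List.slice st.2.2 (some i) none)

theorem pvA_eq (N : Int) (la ra : List (Int × Int)) :
    map_angles_general N la ra = ((PySem.List.pyRange 1 N 1).foldl pvStepA (PySem.Dict.empty, ra.reverse, la)).1.items := rfl

theorem pvB_eq (N : Int) (la ra : List (Int × Int)) :
    map_angles_general_alt N la ra = ((PySem.List.pyRange 1 N 1).foldl pvStepB (PySem.Dict.empty, ra.reverse, la)).1.items := rfl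

-- zip truncation helpers
theorem pv_zip_append_left {α β : Type} : ∀ (r : List β) (l1 l2 : List α),
    r.length ≤ l1.length → (l1 ++ l2).zip r = l1.zip r := by
  intro r
  induction r with
  | nil => intro l1 l2 _; simp
  | cons y r ih =>
    intro l1 l2 h
    cases l1 with
    | nil => simp at h
    | cons x l1 => simpa [List.zip_cons_cons] using ih l1 l2 (by simpa using h)

-- the label block may be capped at the number of remaining angles: zip
-- truncates there anyway
theorem pv_zip_range_min {α β : Type} (a i : Int) (f : Int → α) (r : List β) :
    ((PySem.List.pyRange a (a + min i (r.length : Int)) 1).map f).zip r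
      = ((PySem.List.pyRange a (a + i) 1).map f).zip r := by
  rcases le_total i (r.length : Int) with hle | hge
  · rw [min_eq_left hle]
  · rw [min_eq_right hge]
    rw [PySem.List.pyRange_one_append a (a + (r.length : Int)) (a + i) (by omega) (by omega)]
    rw [List.map_append]
    rw [pv_zip_append_left]
    simp [PySem.List.length_pyRange_one]

-- A's guarded inner loops: pop-from-the-front with an emptiness guard IS
-- "zip the labels with the stream (truncating), insert each pair, drop what was consumed"
theorem pvInnerOdd (i : Int) : ∀ (js : List Int) (m : PySem.Dict String (Int × Int)) (r l : List (Int × Int)),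
    js.foldl (fun (st : pvAState) j =>
        match st.2.1 with
        | [] => st
        | p :: rest => (st.1.insert (labelOdd i j) p, rest, st.2.2)) (m, r, l)
    = (((js.map (fun j => labelOdd i j)).zip r).foldl (fun m p => m.insert p.1 p.2) m,
       r.drop js.length, l) := by
  intro js
  induction js with
  | nil => intro m r l; simp
  | cons j js ih =>
    intro m r l
    cases r with
    | nil => simp [List.foldl_cons, ih]
    | cons p rest => simp [List.foldl_cons, List.zip_cons_cons, ih]

theorem pvInnerEven (i : Int) : ∀ (js : List Int) (m : PySem.Dict String (Int × Int)) (r l : List (Int × Int)),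
    js.foldl (fun (st : pvAState) j =>
        match st.2.2 with
        | [] => st
        | p :: rest => (st.1.insert (labelEven i j) p, st.2.1, rest)) (m, r, l)
    = (((js.map (fun j => labelEven i j)).zip l).foldl (fun m p => m.insert p.1 p.2) m,
       r, l.drop js.length) := by
  intro js
  induction js with
  | nil => intro m r l; simp
  | cons j js ih =>
    intro m r l
    cases l with
    | nil => simp [List.foldl_cons, ih]
    | cons p rest => simp [List.foldl_cons, List.zip_cons_cons, ih]

-- on every diagonal i ≥ 1 the two step functions agree
theorem pvStep_eq (i : Int) (hi : 1 ≤ i) (st : pvAState) : pvStepB st i = pvStepA st i := by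
  obtain ⟨m, r, l⟩ := st
  have h0 : (0 : Int) ≤ i := by omega
  by_cases hodd : i % 2 = 1
  · rw [pvStepB, pvStepA, if_pos (by simp [hodd]), if_pos (by simp [hodd])]
    rw [pvInnerOdd]
    simp only []
    have hz := pv_zip_range_min 0 i (fun j => labelOdd i j) r
    rw [zero_add, zero_add] at hz
    rw [hz]
    rw [PySem.List.slice_from _ h0]
    simp [PySem.List.length_pyRange_one]
  · rw [pvStepB, pvStepA, if_neg (by simp; omega), if_neg (by simp; omega)]
    rw [pvInnerEven]
    simp only []
    have hz := pv_zip_range_min 1 i (fun j => labelEven i j) l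
    rw [show (1 : Int) + min i (l.length : Int) = min i (l.length : Int) + 1 by ring,
        show (1 : Int) + i = i + 1 by ring] at hz
    rw [hz]
    rw [PySem.List.slice_from _ h0]
    simp [PySem.List.length_pyRange_one]

theorem pvFoldl_congr {α β : Type} : ∀ (l : List β) (f g : α → β → α) (init : α),
    (∀ st x, x ∈ l → f st x = g st x) → l.foldl f init = l.foldl g init := by
  intro l
  induction l with
  | nil => intro f g init _; rfl
  | cons x l ih =>
    intro f g init h
    simp only [List.foldl_cons]
    rw [h init x (by simp)]
    exact ih f g _ (fun st y hy => h st y (by simp [hy]))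

-- ===== VERDICT (by name: the statement is the Claim_ definition above) =====
theorem map_angles_general_spec : Claim_equal_map_angles_general := by
  intro N la ra _
  unfold Spec_map_angles_general
  rw [pvA_eq, pvB_eq]
  have h := pvFoldl_congr (PySem.List.pyRange 1 N 1) pvStepA pvStepB
    (PySem.Dict.empty, ra.reverse, la)
    (fun st x hx => (pvStep_eq x ((PySem.List.mem_pyRange_one.mp hx).1) st).symm)
  rw [h]
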